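-- pv_equiv track=rewrite | github.com/xiaoyiou/Gene2Vec | scripts/experiments.py | __getSubset
-- ===== SOURCE A (Python) =====
-- def __getSubset(lst,remain):
--     result=[]
--     if remain==1:
--         for elem in lst:
--             result.append([elem])
--
--     else:
--         for i in range(len(lst)-remain):
--             t=__getSubset(lst[i+1:],remain-1)
--             for elem in t:
--                 result.append([lst[i]]+elem)
--     return result
-- ===== SOURCE B (Python) =====
-- def __getSubset(lst, remain):
--     # Iterative worklist version: an explicit LIFO stack of (prefix, sublist, remain)
--     # frames replaces the recursion; children are pushed in reverse index order so
--     # combinations are emitted in the same order as the recursive original.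
--     result = []
--     stack = [([], lst, remain)]
--     while stack:
--         prefix, sub, r = stack.pop()
--         if r == 1:
--             for elem in sub:
--                 result.append(prefix + [elem])
--         else:
--             for i in reversed(range(len(sub) - r)):
--                 stack.append((prefix + [sub[i]], sub[i + 1:], r - 1))
--     return result
-- ===== Notes on version B (the rewrite author's own statement) =====
-- stated objective: alternative
-- what changed: Replaced A's recursion by an explicit LIFO worklist of (prefix, sublist, remain) frames, pushing children in reverse index order so combinations are emitted in the same order; the buggy range bound and base case are kept verbatim.
-- outside the precondition, e.g. on __getSubset([1], 0): A raises RecursionError, B raises IndexError; on __getSubset([], -1): A raises RecursionError, B raises IndexError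
import Mathlib
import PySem

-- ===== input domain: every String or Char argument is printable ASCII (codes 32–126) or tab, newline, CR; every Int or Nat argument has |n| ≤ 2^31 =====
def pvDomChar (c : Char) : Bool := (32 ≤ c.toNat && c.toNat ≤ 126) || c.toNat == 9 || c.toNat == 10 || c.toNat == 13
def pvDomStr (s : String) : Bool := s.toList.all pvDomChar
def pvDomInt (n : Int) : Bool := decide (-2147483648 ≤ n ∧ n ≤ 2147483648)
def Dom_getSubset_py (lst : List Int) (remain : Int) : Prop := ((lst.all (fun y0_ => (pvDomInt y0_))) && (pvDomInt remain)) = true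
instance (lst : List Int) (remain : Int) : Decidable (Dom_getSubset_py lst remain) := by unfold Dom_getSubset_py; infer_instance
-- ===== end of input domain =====

-- B replaces A's recursion by an explicit LIFO worklist of (prefix, sublist, remain) frames
-- (children pushed in reverse index order), a different decomposition of the same enumeration.


-- ===== PORT A =====
-- fuel only makes the recursion total; under Pre_ (proved below) fuel lst.length + 1 is never exhausted
def getSubA : Nat → List Int → Int → List (List Int)
  | 0, _, _ => []
  | f+1, lst, remain =>
    if remain = 1 then
      lst.foldl (fun result elem => result ++ [[elem]]) []
    else
      (PySem.List.pyRange 0 ((lst.length : Int) - remain) 1).foldl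
        (fun result i =>
          (getSubA f (PySem.List.slice lst (some (i+1)) none) (remain-1)).foldl
            (fun res elem => res ++ [[PySem.List.pyGetD lst i 0] ++ elem]) result)
        []

def getSubset_py (lst : List Int) (remain : Int) : List (List Int) :=
  getSubA (lst.length + 1) lst remain

-- ===== PORT B =====
-- the while-loop over the explicit stack (head = top of stack); pushing the children in
-- reversed index order and then popping = prepending them in ascending order here.
-- fuel only makes the loop total; under Pre_ (proved below) it is never exhausted.
def loopB : Nat → List (List Int × List Int × Int) → List (List Int) → List (List Int)
  | 0, _, result => result
  | _+1, [], result => result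
  | f+1, (pre, sub, r) :: rest, result =>
    if r = 1 then
      loopB f rest (sub.foldl (fun res elem => res ++ [pre ++ [elem]]) result)
    else
      loopB f
        (((PySem.List.pyRange 0 ((sub.length : Int) - r) 1).map
          (fun i => (pre ++ [PySem.List.pyGetD sub i 0], PySem.List.slice sub (some (i+1)) none, r - 1))) ++ rest)
        result

def getSubset_py_alt (lst : List Int) (remain : Int) : List (List Int) :=
  loopB (lst.length + 1).factorial [([], lst, remain)] []

-- ===== PRECONDITION & SPEC =====
-- Pre_ excludes exactly the inputs on which A diverges (Python: RecursionError):
-- remain ≤ 0, except remain = 0 with the empty list (which returns []).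
def Pre_getSubset_py (lst : List Int) (remain : Int) : Prop :=
  1 ≤ remain ∨ (remain = 0 ∧ lst = [])
instance (lst : List Int) (remain : Int) : Decidable (Pre_getSubset_py lst remain) := by
  unfold Pre_getSubset_py; infer_instance

def pvWitness_getSubset_py : List Int × Int := ([1, 2, 3, 4], 2)

def Spec_getSubset_py (lst : List Int) (remain : Int) (out : List (List Int)) : Prop := out = getSubset_py_alt lst remain
instance (lst : List Int) (remain : Int) (out : List (List Int)) : Decidable (Spec_getSubset_py lst remain out) := by unfold Spec_getSubset_py; infer_instance

-- ===== CLAIM (what is proved, stated in full; the proofs are below) =====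
def Claim_equal_getSubset_py : Prop := ∀ (lst : List Int) (remain : Int), Dom_getSubset_py lst remain → Pre_getSubset_py lst remain → Spec_getSubset_py lst remain (getSubset_py lst remain)

-- ===== LEMMAS AND PROOFS =====

-- the frames a run starting from a Pre_ input can ever reach
def pvWfFrame (fr : List Int × List Int × Int) : Prop :=
  1 ≤ fr.2.2 ∨ (fr.2.2 = 0 ∧ fr.2.1 = [])

-- termination budget of a stack: each frame of sublist length L costs at most (L+1)! pops
def pvMu (st : List (List Int × List Int × Int)) : Nat :=
  (st.map (fun fr => (fr.2.1.length + 1).factorial)).sum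

theorem pvFlattenMapSingleton (p : List Int) (s : List Int) :
    (s.map (fun x => [p ++ [x]])).flatten = s.map (fun x => p ++ [x]) := by
  induction s with
  | nil => rfl
  | cons a t ih => simp [ih]

theorem pvWf_of (pre sub : List Int) (r : Int) (h : 1 ≤ r) : pvWfFrame (pre, sub, r) := Or.inl h

-- one unfolding of A's recursion, with the two appending for-loops in closed form
theorem getSubA_succ (f : Nat) (s : List Int) (r : Int) :
    getSubA (f+1) s r =
      if r = 1 then s.map (fun e => [e])
      else (PySem.List.pyRange 0 ((s.length : Int) - r) 1).flatMap
        (fun i => (getSubA f (PySem.List.slice s (some (i+1)) none) (r-1)).map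
          (fun e => [PySem.List.pyGetD s i 0] ++ e)) := by
  show (if r = 1 then _ else _) = _
  split
  · simp only [PySem.List.foldl_append_singleton_eq_map, List.nil_append]
  · simp only [PySem.List.foldl_append_singleton_eq_map, PySem.List.foldl_append_eq_flatMap,
      List.nil_append]

-- the result does not depend on the fuel once fuel > length (on reachable frames)
theorem getSubA_fuel (n : Nat) : ∀ (s : List Int) (r : Int) (f : Nat),
    s.length ≤ n → s.length < f → pvWfFrame ([], s, r) →
    getSubA f s r = getSubA (s.length + 1) s r := by
  induction n with
  | zero =>
    intro s r f hn hf hwf0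
    have hwf : 1 ≤ r ∨ (r = 0 ∧ s = []) := hwf0
    have hs : s = [] := List.eq_nil_of_length_eq_zero (Nat.le_zero.mp hn)
    subst hs
    obtain ⟨f, rfl⟩ : ∃ f', f = f' + 1 := ⟨f - 1, by omega⟩
    rw [getSubA_succ, getSubA_succ]
    by_cases hr : r = 1
    · simp [hr]
    · have hneg : (-r : Int) ≤ 0 := by rcases hwf with h | ⟨h, _⟩ <;> omega
      simp [hr, PySem.List.pyRange_one_eq_nil hneg]
  | succ n ih =>
    intro s r f hn hf hwf0
    have hwf : 1 ≤ r ∨ (r = 0 ∧ s = []) := hwf0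
    obtain ⟨f, rfl⟩ : ∃ f', f = f' + 1 := ⟨f - 1, by omega⟩
    rw [getSubA_succ, getSubA_succ]
    by_cases hr : r = 1
    · simp [hr]
    · simp only [if_neg hr]
      apply List.flatMap_congr
      intro i hi
      obtain ⟨hi0, hiu⟩ := (PySem.List.mem_pyRange_one).mp hi
      have hr2 : 2 ≤ r := by
        rcases hwf with h | ⟨h1, h2⟩
        · omega
        · subst h2; simp at hiu; omega
      rw [PySem.List.slice_from s (by omega : (0:Int) ≤ i + 1)]
      have hlen : (s.drop (i+1).toNat).length = s.length - (i+1).toNat := List.length_drop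
      have hlt : (s.drop (i+1).toNat).length < s.length := by
        rw [hlen]; omega
      rw [ih _ (r-1) f (by omega) (by omega) (pvWf_of _ _ _ (by omega)),
          ih _ (r-1) s.length (by omega) (by omega) (pvWf_of _ _ _ (by omega))]

-- the loop invariant: with enough fuel, the loop appends to `result` the concatenated
-- recursive answers of all stacked frames, each mapped under its prefix
theorem loopB_spec (f : Nat) : ∀ (st : List (List Int × List Int × Int)) (res : List (List Int)),
    (∀ fr ∈ st, pvWfFrame fr) → pvMu st ≤ f →
    loopB f st res = res ++ st.flatMap
      (fun fr => (getSubA (fr.2.1.length + 1) fr.2.1 fr.2.2).map (fun e => fr.1 ++ e)) := by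
  induction f with
  | zero =>
    intro st res hwf hmu
    cases st with
    | nil => simp [loopB]
    | cons fr rest =>
      exfalso
      have h1 := Nat.factorial_pos (fr.2.1.length + 1)
      simp [pvMu] at hmu
      omega
  | succ f ih =>
    intro st res hwf hmu
    cases st with
    | nil => simp [loopB]
    | cons fr rest =>
      obtain ⟨p, s, r⟩ := fr
      have hwfhead : 1 ≤ r ∨ (r = 0 ∧ s = []) := hwf _ List.mem_cons_self
      have hmu' : (s.length + 1).factorial + pvMu rest ≤ f + 1 := by
        simpa [pvMu] using hmu
      have hfact := Nat.factorial_pos s.length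
      have hfactS : (s.length + 1).factorial = s.length * s.length.factorial + s.length.factorial := by
        rw [Nat.factorial_succ]; ring
      simp only [loopB]
      by_cases hr : r = 1
      · rw [if_pos hr]
        rw [ih rest _ (fun fr h => hwf fr (List.mem_cons_of_mem _ h)) (by omega)]
        subst hr
        simp [getSubA_succ, List.map_map,
          Function.comp_def, pvFlattenMapSingleton]
      · rw [if_neg hr]
        -- the children pushed for this frame (ascending index order = reversed pushes popped)
        set mk : Int → List Int × List Int × Int := fun i =>
          (p ++ [PySem.List.pyGetD s i 0], PySem.List.slice s (some (i+1)) none, r - 1) with hmk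
        -- facts about any index i of the range
        have hbound : ∀ i ∈ PySem.List.pyRange 0 ((s.length : Int) - r) 1,
            0 ≤ i ∧ i < (s.length : Int) - r ∧ 2 ≤ r := by
          intro i hi
          obtain ⟨hi0, hiu⟩ := (PySem.List.mem_pyRange_one).mp hi
          refine ⟨hi0, hiu, ?_⟩
          rcases hwfhead with h | ⟨h1, h2⟩
          · omega
          · subst h2; simp at hiu; omega
        have hdlen : ∀ i ∈ PySem.List.pyRange 0 ((s.length : Int) - r) 1,
            (PySem.List.slice s (some (i+1)) none).length < s.length := by
          intro i hi
          obtain ⟨hi0, hiu, hr2⟩ := hbound i hi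
          rw [PySem.List.slice_from s (by omega : (0:Int) ≤ i + 1), List.length_drop]
          omega
        have hwf' : ∀ fr ∈ (PySem.List.pyRange 0 ((s.length : Int) - r) 1).map mk ++ rest,
            pvWfFrame fr := by
          intro fr hfr
          rcases List.mem_append.mp hfr with hin | hin
          · obtain ⟨i, hi, rfl⟩ := List.mem_map.mp hin
            exact pvWf_of _ _ _ (by have := (hbound i hi).2.2; omega)
          · exact hwf fr (List.mem_cons_of_mem _ hin)
        have hmuch : pvMu ((PySem.List.pyRange 0 ((s.length : Int) - r) 1).map mk) ≤
            s.length * s.length.factorial := by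
          unfold pvMu
          rw [List.map_map]
          calc ((PySem.List.pyRange 0 ((s.length : Int) - r) 1).map
                  ((fun fr => (fr.2.1.length + 1).factorial) ∘ mk)).sum
              ≤ ((PySem.List.pyRange 0 ((s.length : Int) - r) 1).map
                  ((fun fr => (fr.2.1.length + 1).factorial) ∘ mk)).length • s.length.factorial := by
                apply List.sum_le_card_nsmul
                intro x hx
                obtain ⟨i, hi, rfl⟩ := List.mem_map.mp hx
                exact Nat.factorial_le (by have := hdlen i hi; simp [hmk]; omega)
            _ ≤ s.length * s.length.factorial := by
                simp [PySem.List.length_pyRange_one]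
                exact Nat.mul_le_mul_right _ (by omega)
        have hmu'' : pvMu ((PySem.List.pyRange 0 ((s.length : Int) - r) 1).map mk ++ rest) ≤ f := by
          have : pvMu ((PySem.List.pyRange 0 ((s.length : Int) - r) 1).map mk ++ rest)
              = pvMu ((PySem.List.pyRange 0 ((s.length : Int) - r) 1).map mk) + pvMu rest := by
            simp [pvMu]
          omega
        rw [ih _ _ hwf' hmu'']
        rw [List.flatMap_append, List.flatMap_map]
        simp only [List.flatMap_cons]
        congr 1
        -- head frame: its children's combined answers = its own recursive answer
        rw [getSubA_succ, if_neg hr, List.map_flatMap]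
        congr 1
        apply List.flatMap_congr
        intro i hi
        obtain ⟨hi0, hiu, hr2⟩ := hbound i hi
        have hlt := hdlen i hi
        rw [getSubA_fuel (PySem.List.slice s (some (i+1)) none).length _ _ s.length
              le_rfl hlt (pvWf_of _ _ _ (by omega))]
        simp [hmk, List.map_map, Function.comp_def]

-- ===== VERDICT (by name: the statement is the Claim_ definition above) =====
theorem getSubset_py_spec : Claim_equal_getSubset_py := by
  intro lst remain _ hpre
  unfold Spec_getSubset_py getSubset_py getSubset_py_alt
  rw [loopB_spec]
  · simp
  · intro fr hfr; simp at hfr; subst hfr; exact hpre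
  · simp [pvMu]
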